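-- pv_equiv track=rewrite | github.com/Enjef/Algo | 1200 - 1299/1288 - Remove Covered Intervals/1288 - Remove Covered Intervals.py | removeCoveredIntervals_2nd_best_speed
-- ===== SOURCE A (Python) =====
-- from typing import List
--
-- def removeCoveredIntervals_2nd_best_speed(
--         intervals: List[List[int]]) -> int:
--     intervals.sort(key=lambda x: (x[0], -x[1]))
--     count = 0
--     prev_end = 0
--     for _, end in intervals:
--         if end > prev_end:
--             count += 1
--             prev_end = end
--     return count
-- ===== SOURCE B (Python) =====
-- def removeCoveredIntervals_2nd_best_speed(intervals):
--     # Group by start: for each distinct start keep its furthest end, then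
--     # sweep the starts in increasing order and count every interval that
--     # reaches strictly beyond all intervals starting at or before it.
--     pairs = [(s, e) for s, e in intervals]
--     count = 0
--     reach = 0
--     for s in sorted({s for s, _ in pairs}):
--         far = max(e for s2, e in pairs if s2 == s)
--         if far > reach:
--             count += 1
--             reach = far
--     return count
-- ===== Notes on version B (the rewrite author's own statement) =====
-- stated objective: alternative
-- what changed: Replaces the in-place sort by (start, -end) plus linear scan over all intervals with grouping by start: B collects the set of distinct starts, computes each start's furthest end by a scan of the pair list, and sweeps the distinct starts in increasing order counting strict extensions of the reach; B does not mutate the input list (A sorts it in place).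
import Mathlib
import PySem

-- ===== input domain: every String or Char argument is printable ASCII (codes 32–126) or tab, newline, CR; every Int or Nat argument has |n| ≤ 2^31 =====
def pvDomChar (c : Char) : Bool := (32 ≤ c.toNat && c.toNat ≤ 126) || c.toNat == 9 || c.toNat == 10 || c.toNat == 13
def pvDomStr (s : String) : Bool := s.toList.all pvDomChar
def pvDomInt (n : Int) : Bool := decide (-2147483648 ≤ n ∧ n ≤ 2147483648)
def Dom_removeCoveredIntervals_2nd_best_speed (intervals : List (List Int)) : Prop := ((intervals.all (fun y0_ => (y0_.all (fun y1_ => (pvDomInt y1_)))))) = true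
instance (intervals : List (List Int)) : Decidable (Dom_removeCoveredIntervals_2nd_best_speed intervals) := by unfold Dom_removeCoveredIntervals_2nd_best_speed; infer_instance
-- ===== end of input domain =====

-- B groups the intervals by start (set of distinct starts, per-start furthest end) and sweeps
-- the starts in increasing order, instead of A's in-place sort by (start, -end) plus scan;
-- A sorts its argument IN PLACE while B does not mutate it — the equivalence proved is about
-- the return value only.

-- ===== PORT A =====
def removeCoveredIntervals_2nd_best_speed (intervals : List (List Int)) : Int :=
  -- intervals.sort(key=lambda x: (x[0], -x[1]))
  let s := PySem.List.sorted2 intervals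
      (fun x => PySem.List.pyGetD x 0 0) (fun x => -(PySem.List.pyGetD x 1 0))
  -- for _, end in intervals: if end > prev_end: count += 1; prev_end = end
  (s.foldl (fun (cp : Int × Int) l =>
      let e := PySem.List.pyGetD l 1 0
      if cp.2 < e then (cp.1 + 1, e) else cp) ((0 : Int), (0 : Int))).1

-- ===== PORT B =====
def removeCoveredIntervals_2nd_best_speed_alt (intervals : List (List Int)) : Int :=
  -- pairs = [(s, e) for s, e in intervals]
  let pairs := intervals.map (fun l => (PySem.List.pyGetD l 0 0, PySem.List.pyGetD l 1 0))
  -- for s in sorted({s for s, _ in pairs}): ...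
  ((PySem.List.sorted (PySem.Set.ofList (pairs.map Prod.fst)) (fun x => x) false).foldl
    (fun (cr : Int × Int) s =>
      -- far = max(e for s2, e in pairs if s2 == s) — the group is nonempty (s is one of the
      -- starts), so max? is `some` there and getD's default is never used
      let far := (PySem.List.max? ((pairs.filter (fun p => p.1 == s)).map Prod.snd)
        (fun y => y)).getD 0
      if cr.2 < far then (cr.1 + 1, far) else cr) ((0 : Int), (0 : Int))).1

-- ===== PRECONDITION & SPEC =====
-- Python A unpacks each row as '_, end' and its sort key reads x[0], x[1]: a row whose
-- length is not exactly 2 raises ValueError/IndexError, so those inputs are excluded.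
def Pre_removeCoveredIntervals_2nd_best_speed (intervals : List (List Int)) : Prop :=
  ∀ l ∈ intervals, l.length = 2
instance (intervals : List (List Int)) : Decidable (Pre_removeCoveredIntervals_2nd_best_speed intervals) := by
  unfold Pre_removeCoveredIntervals_2nd_best_speed; infer_instance

def pvWitness_removeCoveredIntervals_2nd_best_speed : List (List Int) := [[1, 4], [2, 3], [0, 5]]

def Spec_removeCoveredIntervals_2nd_best_speed (intervals : List (List Int)) (out : Int) : Prop := out = removeCoveredIntervals_2nd_best_speed_alt intervals
instance (intervals : List (List Int)) (out : Int) : Decidable (Spec_removeCoveredIntervals_2nd_best_speed intervals out) := by unfold Spec_removeCoveredIntervals_2nd_best_speed; infer_instance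

-- ===== CLAIM (what is proved, stated in full; the proofs are below) =====
def Claim_equal_removeCoveredIntervals_2nd_best_speed : Prop := ∀ (intervals : List (List Int)), Dom_removeCoveredIntervals_2nd_best_speed intervals → Pre_removeCoveredIntervals_2nd_best_speed intervals → Spec_removeCoveredIntervals_2nd_best_speed intervals (removeCoveredIntervals_2nd_best_speed intervals)

-- ===== LEMMAS AND PROOFS =====

-- A's comparator on sort keys (k1 x, k2 x) is exactly the lexicographic strict order
theorem pvBefore_eq {α : Type} (k1 k2 : α → Int) (a b : α) :
    (decide (k1 a < k1 b) || !decide (k1 b < k1 a) && decide (k2 a < k2 b))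
      = decide (toLex (k1 a, k2 a) < toLex (k1 b, k2 b)) := by
  rw [Bool.eq_iff_iff]
  simp only [Bool.or_eq_true, Bool.and_eq_true, Bool.not_eq_true', decide_eq_true_eq,
    decide_eq_false_iff_not, Prod.Lex.lt_iff, ofLex_toLex]
  omega

theorem pvSorted2_eq {α : Type} (xs : List α) (k1 k2 : α → Int) :
    PySem.List.sorted2 xs k1 k2 false
      = PySem.List.sorted xs (fun x => toLex (k1 x, k2 x)) false := by
  unfold PySem.List.sorted2 PySem.List.sorted
  simp only [if_neg (by decide : ¬ (false = true))]
  have : (fun (a b : α) => decide (k1 a < k1 b) || !decide (k1 b < k1 a) && decide (k2 a < k2 b))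
      = fun a b => decide (toLex (k1 a, k2 a) < toLex (k1 b, k2 b)) := by
    funext a b; exact pvBefore_eq k1 k2 a b
  rw [this]

-- the (start, end) pair a row denotes, and A's sort key on pairs
def pvPair (l : List Int) : Int × Int := (PySem.List.pyGetD l 0 0, PySem.List.pyGetD l 1 0)

def pvKey (q : Int × Int) : Lex (Int × Int) := toLex (q.1, -q.2)

-- r covers q  iff  (s_r < s_q and e_q <= e_r) or (s_r = s_q and e_q < e_r); "q uncovered in t"
def pvCovers (r q : Int × Int) : Bool :=
  (r.1 < q.1 && q.2 ≤ r.2) || (r.1 == q.1 && q.2 < r.2)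

def pvUnc (t : List (Int × Int)) (q : Int × Int) : Bool :=
  !(t.any (fun r => pvCovers r q))

-- "q survives the reach-0 sweep over t"
def pvG (p : Int) (t : List (Int × Int)) (q : Int × Int) : Bool :=
  decide (p < q.2) && pvUnc t q

-- the distinct survivors of t, counted
def pvCnt (p : Int) (t : List (Int × Int)) : Int :=
  (((t.filter (pvG p t)).toFinset).card : Int)

-- B's furthest end of the group of start s
def pvFar (t : List (Int × Int)) (s : Int) : Int :=
  (PySem.List.max? ((t.filter (fun p => p.1 == s)).map Prod.snd) (fun y => y)).getD 0

theorem pvKey_le_iff (a b : Int × Int) :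
    pvKey a ≤ pvKey b ↔ a.1 < b.1 ∨ (a.1 = b.1 ∧ b.2 ≤ a.2) := by
  simp only [pvKey, Prod.Lex.le_iff, ofLex_toLex]
  omega

theorem pvG_true_iff (p : Int) (t : List (Int × Int)) (x : Int × Int) :
    pvG p t x = true ↔
      p < x.2 ∧ ∀ r ∈ t, ¬(r.1 < x.1 ∧ x.2 ≤ r.2) ∧ ¬(r.1 = x.1 ∧ x.2 < r.2) := by
  simp [pvG, pvUnc, pvCovers, not_or]

-- head not counted (its end is at or below the floor): nothing changes
theorem pvFilter_skip (p : Int) (q : Int × Int) (tl : List (Int × Int)) (h : q.2 ≤ p) :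
    List.filter (pvG p (q :: tl)) (q :: tl) = List.filter (pvG p tl) tl := by
  rw [List.filter_cons_of_neg (by simp [pvG]; omega)]
  apply List.filter_congr
  intro x hx
  rw [Bool.eq_iff_iff, pvG_true_iff, pvG_true_iff]
  constructor
  · rintro ⟨h1, h2⟩
    exact ⟨h1, fun r hr => h2 r (List.mem_cons_of_mem _ hr)⟩
  · rintro ⟨h1, h2⟩
    refine ⟨h1, fun r hr => ?_⟩
    rcases List.mem_cons.mp hr with rfl | hr'
    · exact ⟨fun hc => by omega, fun hc => by omega⟩
    · exact h2 r hr'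

-- head counted: the survivor set gains exactly the head, floor rises to its end
theorem pvFinset_take (p : Int) (q : Int × Int) (tl : List (Int × Int)) (h : p < q.2)
    (hq : ∀ b ∈ tl, pvKey q ≤ pvKey b) :
    (List.filter (pvG p (q :: tl)) (q :: tl)).toFinset
      = insert q (List.filter (pvG q.2 tl) tl).toFinset := by
  ext x
  simp only [List.mem_toFinset, List.mem_filter, List.mem_cons, Finset.mem_insert,
    pvG_true_iff]
  constructor
  · rintro ⟨hx, hpx, hall⟩
    by_cases hxq : x = q
    · exact Or.inl hxq
    rcases hx with rfl | hx
    · exact Or.inl rfl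
    refine Or.inr ⟨hx, ?_, fun r hr => hall r (Or.inr hr)⟩
    have hh := hall q (Or.inl rfl)
    have hk := (pvKey_le_iff q x).mp (hq x hx)
    rcases hk with hk | ⟨hk1, hk2⟩
    · rcases hh with ⟨hh1, _⟩; omega
    · exfalso
      apply hxq
      rcases hh with ⟨_, hh2⟩
      have : x.2 = q.2 := by omega
      exact Prod.ext (by omega) this
  · rintro (rfl | ⟨hx, hqx, hallt⟩)
    · refine ⟨Or.inl rfl, h, fun r hr => ?_⟩
      rcases hr with rfl | hr'
      · exact ⟨fun hc => by omega, fun hc => by omega⟩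
      · have hk := (pvKey_le_iff x r).mp (hq r hr')
        exact ⟨fun hc => by omega, fun hc => by omega⟩
    · refine ⟨Or.inr hx, by omega, fun r hr => ?_⟩
      rcases hr with rfl | hr'
      · exact ⟨fun hc => by omega, fun hc => by omega⟩
      · exact hallt r hr'

theorem pvNotMem_take (q : Int × Int) (tl : List (Int × Int)) :
    q ∉ (List.filter (pvG q.2 tl) tl).toFinset := by
  simp only [List.mem_toFinset, List.mem_filter, pvG_true_iff]
  rintro ⟨-, hc, -⟩
  omega

-- a reach-0 sweep over a key-sorted list counts exactly the distinct survivors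
theorem pvFold (t : List (Int × Int)) (hs : t.Pairwise (fun a b => pvKey a ≤ pvKey b)) :
    ∀ p c, (t.foldl (fun (cp : Int × Int) x => if cp.2 < x.2 then (cp.1 + 1, x.2) else cp) (c, p)).1
      = c + pvCnt p t := by
  induction t with
  | nil => intro p c; simp [pvCnt]
  | cons q tl ih =>
    intro p c
    obtain ⟨hq, htl⟩ := List.pairwise_cons.mp hs
    rw [List.foldl_cons]
    by_cases hpe : p < q.2
    · rw [if_pos hpe, ih htl q.2 (c + 1)]
      unfold pvCnt
      rw [pvFinset_take p q tl hpe hq, Finset.card_insert_of_notMem (pvNotMem_take q tl)]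
      push_cast
      ring
    · rw [if_neg hpe, ih htl p c]
      unfold pvCnt
      rw [pvFilter_skip p q tl (by omega)]

theorem pvCnt_perm (p : Int) (t1 t2 : List (Int × Int)) (h : t1.Perm t2) :
    pvCnt p t1 = pvCnt p t2 := by
  have hg : ∀ x, pvG p t1 x = pvG p t2 x := by
    intro x
    rw [Bool.eq_iff_iff, pvG_true_iff, pvG_true_iff]
    exact ⟨fun ⟨h1, h2⟩ => ⟨h1, fun r hr => h2 r (h.mem_iff.mpr hr)⟩,
           fun ⟨h1, h2⟩ => ⟨h1, fun r hr => h2 r (h.mem_iff.mp hr)⟩⟩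
  have hfs : (t1.filter (pvG p t1)).toFinset = (t2.filter (pvG p t2)).toFinset := by
    ext x
    simp [List.mem_toFinset, h.mem_iff, hg]
  unfold pvCnt
  rw [hfs]

theorem pvA_eq (l : List (List Int)) :
    removeCoveredIntervals_2nd_best_speed l = pvCnt 0 (l.map pvPair) := by
  unfold removeCoveredIntervals_2nd_best_speed
  show (List.foldl (fun (cp : Int × Int) l =>
      let e := PySem.List.pyGetD l 1 0
      if cp.2 < e then (cp.1 + 1, e) else cp) ((0 : Int), (0 : Int))
      (PySem.List.sorted2 l (fun x => PySem.List.pyGetD x 0 0)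
        (fun x => -(PySem.List.pyGetD x 1 0)))).1 = _
  have hmap : ∀ (t : List (List Int)) (init : Int × Int),
      t.foldl (fun (cp : Int × Int) l =>
        let e := PySem.List.pyGetD l 1 0
        if cp.2 < e then (cp.1 + 1, e) else cp) init
      = (t.map pvPair).foldl (fun (cp : Int × Int) x =>
          if cp.2 < x.2 then (cp.1 + 1, x.2) else cp) init := by
    intro t init
    rw [List.foldl_map]
    rfl
  rw [hmap]
  have hpw : ((PySem.List.sorted2 l (fun x => PySem.List.pyGetD x 0 0)
      (fun x => -(PySem.List.pyGetD x 1 0))).map pvPair).Pairwise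
      (fun a b => pvKey a ≤ pvKey b) := by
    rw [pvSorted2_eq]
    exact List.pairwise_map.mpr
      (PySem.List.sorted_pairwise l (fun x => toLex (PySem.List.pyGetD x 0 0, -(PySem.List.pyGetD x 1 0))))
  rw [pvFold _ hpw 0 0]
  rw [pvCnt_perm 0 _ _ ((PySem.List.sorted2_perm l _ _ false).map pvPair)]
  ring

-- the furthest end of an inhabited group is attained and dominates the group
theorem pvFar_mem (t : List (Int × Int)) (s : Int) (h : s ∈ t.map Prod.fst) :
    (s, pvFar t s) ∈ t := by
  obtain ⟨p, hp, rfl⟩ := List.mem_map.mp h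
  have hmem : p.2 ∈ (t.filter (fun p' => p'.1 == p.1)).map Prod.snd :=
    List.mem_map_of_mem (List.mem_filter.mpr ⟨hp, by simp⟩)
  cases hmax : PySem.List.max? ((t.filter (fun p' => p'.1 == p.1)).map Prod.snd)
      (fun y => y) with
  | none =>
    rw [(PySem.List.max?_eq_none_iff _ _).mp hmax] at hmem
    exact absurd hmem (List.not_mem_nil)
  | some m =>
    have hin := PySem.List.max?_mem hmax
    obtain ⟨q, hq, hq2⟩ := List.mem_map.mp hin
    obtain ⟨hqt, hq1⟩ := List.mem_filter.mp hq
    have hqe : q = (p.1, pvFar t p.1) := by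
      have hfar : pvFar t p.1 = m := by unfold pvFar; rw [hmax]; rfl
      exact Prod.ext (by simpa using hq1) (by rw [hfar, hq2])
    exact hqe ▸ hqt

theorem pvFar_max (t : List (Int × Int)) (q : Int × Int) (hq : q ∈ t) :
    q.2 ≤ pvFar t q.1 := by
  have hmm : q.2 ∈ (t.filter (fun p' => p'.1 == q.1)).map Prod.snd :=
    List.mem_map_of_mem (List.mem_filter.mpr ⟨hq, by simp⟩)
  cases hmax : PySem.List.max? ((t.filter (fun p' => p'.1 == q.1)).map Prod.snd)
      (fun y => y) with
  | none =>
    rw [(PySem.List.max?_eq_none_iff _ _).mp hmax] at hmm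
    exact absurd hmm (List.not_mem_nil)
  | some m =>
    have := PySem.List.max?_isMax hmax q.2 hmm
    unfold pvFar
    rw [hmax]
    exact this

-- B's per-start list: distinct starts in increasing order with their furthest ends
def pvBP (t : List (Int × Int)) : List (Int × Int) :=
  (PySem.List.sorted (PySem.Set.ofList (t.map Prod.fst)) (fun x => x) false).map
    (fun s => (s, pvFar t s))

theorem pvBP_starts (t : List (Int × Int)) (s : Int) :
    s ∈ PySem.List.sorted (PySem.Set.ofList (t.map Prod.fst)) (fun x => x) false
      ↔ s ∈ t.map Prod.fst := by
  rw [PySem.List.mem_sorted, PySem.Set.mem_ofList]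

theorem pvBP_sub (t : List (Int × Int)) (x : Int × Int) (hx : x ∈ pvBP t) : x ∈ t := by
  obtain ⟨s, hs, rfl⟩ := List.mem_map.mp hx
  exact pvFar_mem t s ((pvBP_starts t s).mp hs)

-- the reach-0 sweep sees the same distinct survivors through pvBP t as through t itself
theorem pvSurv_eq (t : List (Int × Int)) :
    ((pvBP t).filter (pvG 0 (pvBP t))).toFinset = (t.filter (pvG 0 t)).toFinset := by
  ext x
  simp only [List.mem_toFinset, List.mem_filter, pvG_true_iff]
  constructor
  · rintro ⟨hx, hpos, hunc⟩
    refine ⟨pvBP_sub t x hx, hpos, fun r hr => ?_⟩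
    have hrbp : (r.1, pvFar t r.1) ∈ pvBP t := by
      apply List.mem_map_of_mem
      exact (pvBP_starts t r.1).mpr (List.mem_map_of_mem hr)
    have h1 := (hunc _ hrbp).1
    have h2 := (hunc _ hrbp).2
    have hfar := pvFar_max t r hr
    simp only at h1 h2
    exact ⟨fun hc => h1 ⟨hc.1, by omega⟩, fun hc => h2 ⟨hc.1, by omega⟩⟩
  · rintro ⟨hx, hpos, hunc⟩
    have hsx : x.1 ∈ t.map Prod.fst := List.mem_map_of_mem hx
    have hfm := pvFar_mem t x.1 hsx
    have hfx : x.2 = pvFar t x.1 := by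
      have hle := pvFar_max t x hx
      by_contra hne
      exact (hunc _ hfm).2 ⟨rfl, by omega⟩
    have hxbp : x ∈ pvBP t := by
      have : x = (x.1, pvFar t x.1) := Prod.ext rfl hfx
      rw [this]
      exact List.mem_map_of_mem ((pvBP_starts t x.1).mpr hsx)
    exact ⟨hxbp, hpos, fun r hr => hunc r (pvBP_sub t r hr)⟩

theorem pvB_eq (l : List (List Int)) :
    removeCoveredIntervals_2nd_best_speed_alt l = pvCnt 0 (l.map pvPair) := by
  unfold removeCoveredIntervals_2nd_best_speed_alt
  show ((PySem.List.sorted (PySem.Set.ofList ((l.map pvPair).map Prod.fst)) (fun x => x) false).foldl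
    (fun (cr : Int × Int) s =>
      let far := (PySem.List.max? (((l.map pvPair).filter (fun p => p.1 == s)).map Prod.snd)
        (fun y => y)).getD 0
      if cr.2 < far then (cr.1 + 1, far) else cr) ((0 : Int), (0 : Int))).1 = _
  have hfold : ∀ (ss : List Int) (init : Int × Int),
      ss.foldl (fun (cr : Int × Int) s =>
        let far := (PySem.List.max? (((l.map pvPair).filter (fun p => p.1 == s)).map Prod.snd)
          (fun y => y)).getD 0
        if cr.2 < far then (cr.1 + 1, far) else cr) init
      = (ss.map (fun s => (s, pvFar (l.map pvPair) s))).foldl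
          (fun (cr : Int × Int) x => if cr.2 < x.2 then (cr.1 + 1, x.2) else cr) init := by
    intro ss init
    rw [List.foldl_map]
    rfl
  rw [hfold]
  have hpw : (pvBP (l.map pvPair)).Pairwise (fun a b => pvKey a ≤ pvKey b) := by
    apply List.pairwise_map.mpr
    apply List.Pairwise.imp (fun {a b} (h : a < b) => (pvKey_le_iff _ _).mpr (Or.inl h))
    exact PySem.List.sorted_ofList_pairwise_lt _
  rw [show (PySem.List.sorted (PySem.Set.ofList ((l.map pvPair).map Prod.fst)) (fun x => x) false).map
      (fun s => (s, pvFar (l.map pvPair) s)) = pvBP (l.map pvPair) from rfl]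
  rw [pvFold _ hpw 0 0]
  unfold pvCnt
  rw [pvSurv_eq]
  ring

-- ===== VERDICT (by name: the statement is the Claim_ definition above) =====
theorem removeCoveredIntervals_2nd_best_speed_spec : Claim_equal_removeCoveredIntervals_2nd_best_speed := by
  intro intervals _ _
  unfold Spec_removeCoveredIntervals_2nd_best_speed
  rw [pvA_eq, pvB_eq]
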